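-- pv_equiv track=rewrite | github.com/Zeus-Eternal/AI-Karen | src/ai_karen_engine/core/reasoning/ice_integration.py | _extract_alts
-- ===== SOURCE A (Python) =====
-- from typing import Any, Dict, List, Optional, Tuple, Literal, Callable
--
-- def _extract_alts(txt: str) -> Tuple[str, List[str]]:
--     lines = txt.splitlines()
--     main, alts, cur = [], [], "main"
--     for line in lines:
--         if any(k in line.lower() for k in ("alternative", "another perspective", "different interpretation")):
--             cur = "alts"; continue
--         (alts if cur == "alts" else main).append(line)
--     primary = "\n".join(main).strip()
--     alt = [s.strip(" -•\t") for s in "\n".join(alts).split("•") if s.strip()]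
--     return primary, alt
-- ===== SOURCE B (Python) =====
-- from typing import Tuple, List
--
-- _KWS = ("alternative", "another perspective", "different interpretation")
--
-- def _is_kw(line: str) -> bool:
--     low = line.lower()
--     return any(k in low for k in _KWS)
--
-- def _extract_alts(txt: str) -> Tuple[str, List[str]]:
--     lines = txt.splitlines()
--     # split point: first keyword line (or end); everything before it is main verbatim
--     i = next((j for j, line in enumerate(lines) if _is_kw(line)), len(lines))
--     main = lines[:i]
--     alts = [line for line in lines[i + 1:] if not _is_kw(line)]
--     primary = "\n".join(main).strip()
--     alt = [s.strip(" -•\t") for s in "\n".join(alts).split("•") if s.strip()]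
--     return primary, alt
-- ===== Notes on version B (the rewrite author's own statement) =====
-- stated objective: alternative
-- what changed: Replaces A's stateful mode-switching loop with a compute-the-split-point decomposition: find the first keyword line, take everything before it as main verbatim, and filter the keyword lines out of the tail to get alts.
import Mathlib
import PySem

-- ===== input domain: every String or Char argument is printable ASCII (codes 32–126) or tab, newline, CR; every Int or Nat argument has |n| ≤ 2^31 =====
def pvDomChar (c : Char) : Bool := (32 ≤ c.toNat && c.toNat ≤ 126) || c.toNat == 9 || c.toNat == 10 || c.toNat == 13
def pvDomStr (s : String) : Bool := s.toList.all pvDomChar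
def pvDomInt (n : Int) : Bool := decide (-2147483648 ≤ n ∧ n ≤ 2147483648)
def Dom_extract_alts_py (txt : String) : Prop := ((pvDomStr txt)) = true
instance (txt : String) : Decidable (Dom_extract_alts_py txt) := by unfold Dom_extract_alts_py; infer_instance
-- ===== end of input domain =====

-- B replaces A's stateful mode-switching loop by computing the split point (first keyword
-- line) and deriving main/alts from it with take/drop/filter; objective: alternative.

-- ===== PORT A =====
-- 'any(k in line.lower() for k in (...))'
def pvKwA (line : String) : Bool :=
  ["alternative", "another perspective", "different interpretation"].any
    (fun k => PySem.Str.isIn k (PySem.Str.lower line))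

-- one iteration of A's for-loop over state (main, alts, cur)
def pvStepA (st : List String × List String × String) (line : String) :
    List String × List String × String :=
  if pvKwA line then (st.1, st.2.1, "alts")
  else if st.2.2 == "alts" then (st.1, st.2.1 ++ [line], st.2.2)
  else (st.1 ++ [line], st.2.1, st.2.2)

def extract_alts_py (txt : String) : String × List String :=
  let lines := PySem.Str.splitlines txt
  let st := lines.foldl pvStepA ([], [], "main")
  let primary := PySem.Str.strip (PySem.Str.join "\n" st.1)
  let alt := (((PySem.Str.split? (PySem.Str.join "\n" st.2.1) "•").getD []).filter
      (fun s => PySem.Str.strip s != "")).map (fun s => PySem.Str.stripChars s " -•\t")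
  (primary, alt)

-- ===== PORT B =====
def pvIsKwB (line : String) : Bool :=
  ["alternative", "another perspective", "different interpretation"].any
    (fun k => PySem.Str.isIn k (PySem.Str.lower line))

def extract_alts_py_alt (txt : String) : String × List String :=
  let lines := PySem.Str.splitlines txt
  -- i = first keyword-line index, or len(lines) if none (List.findIdx returns length then)
  let i := lines.findIdx pvIsKwB
  let main := lines.take i
  let alts := (lines.drop (i + 1)).filter (fun l => !pvIsKwB l)
  let primary := PySem.Str.strip (PySem.Str.join "\n" main)
  let alt := (((PySem.Str.split? (PySem.Str.join "\n" alts) "•").getD []).filter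
      (fun s => PySem.Str.strip s != "")).map (fun s => PySem.Str.stripChars s " -•\t")
  (primary, alt)

-- ===== PRECONDITION & SPEC =====
def Spec_extract_alts_py (txt : String) (out : String × List String) : Prop := out = extract_alts_py_alt txt
instance (txt : String) (out : String × List String) : Decidable (Spec_extract_alts_py txt out) := by unfold Spec_extract_alts_py; infer_instance

-- ===== CLAIM (what is proved, stated in full; the proofs are below) =====
def Claim_equal_extract_alts_py : Prop := ∀ (txt : String), Dom_extract_alts_py txt → Spec_extract_alts_py txt (extract_alts_py txt)

-- ===== LEMMAS AND PROOFS =====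

-- once in "alts" mode, A keeps exactly the non-keyword lines
theorem pvLoop_alts (t : List String) (m a : List String) :
    t.foldl pvStepA (m, a, "alts") = (m, a ++ t.filter (fun l => !pvKwA l), "alts") := by
  induction t generalizing a with
  | nil => simp
  | cons l t ih =>
    by_cases h : pvKwA l = true
    · simp [List.foldl_cons, pvStepA, h, ih]
    · simp [List.foldl_cons, pvStepA, h, ih]

-- in "main" mode, A's result is determined by the first keyword line
theorem pvLoop_main (lines : List String) (m a : List String) :
    lines.foldl pvStepA (m, a, "main") =
      (m ++ lines.take (lines.findIdx pvKwA),
       a ++ ((lines.drop (lines.findIdx pvKwA + 1)).filter (fun l => !pvKwA l)),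
       if lines.any pvKwA then "alts" else "main") := by
  induction lines generalizing m with
  | nil => simp
  | cons l t ih =>
    by_cases h : pvKwA l = true
    · simp [List.foldl_cons, pvStepA, h, List.findIdx_cons, pvLoop_alts]
    · simp [List.foldl_cons, pvStepA, h, List.findIdx_cons, ih (m ++ [l])]

-- ===== VERDICT (by name: the statement is the Claim_ definition above) =====
theorem extract_alts_py_spec : Claim_equal_extract_alts_py := by
  intro txt _
  unfold Spec_extract_alts_py extract_alts_py extract_alts_py_alt
  have hkw : pvIsKwB = pvKwA := rfl
  simp only [pvLoop_main, List.nil_append, hkw]
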